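-- pv_equiv track=rewrite | github.com/Lumenario-Solutions/gateways | mpesa/services/transaction_service.py | _generate_reconciliation_recommendations
-- ===== SOURCE A (Python) =====
-- def _generate_reconciliation_recommendations(issues):
--     """Generate recommendations based on reconciliation issues."""
--     recommendations = []
--
--     callback_timeout_count = len([i for i in issues if i['issue_type'] == 'callback_timeout'])
--     if callback_timeout_count > 0:
--         recommendations.append({
--             'type': 'callback_timeout',
--             'message': f'{callback_timeout_count} transactions are pending without callbacks. Consider querying their status.',
--             'action': 'Query STK status for pending transactions'
--         })
--
--     missing_receipt_count = len([i for i in issues if i['issue_type'] == 'missing_receipt'])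
--     if missing_receipt_count > 0:
--         recommendations.append({
--             'type': 'missing_receipt',
--             'message': f'{missing_receipt_count} successful transactions are missing receipt numbers.',
--             'action': 'Review transaction data and update if possible'
--         })
--
--     failed_callback_count = len([i for i in issues if i['issue_type'] == 'callback_processing_failed'])
--     if failed_callback_count > 0:
--         recommendations.append({
--             'type': 'failed_callbacks',
--             'message': f'{failed_callback_count} callbacks failed to process.',
--             'action': 'Review callback logs and reprocess if necessary'
--         })
--
--     return recommendations
-- ===== SOURCE B (Python) =====
-- def _generate_reconciliation_recommendations(issues):
--     """Spec-table rewrite: one counting pass, then one pass over a recommendation table."""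
--     counts = {}
--     for i in issues:
--         t = i['issue_type']
--         counts[t] = counts.get(t, 0) + 1
--     spec = [
--         ('callback_timeout', 'callback_timeout',
--          ' transactions are pending without callbacks. Consider querying their status.',
--          'Query STK status for pending transactions'),
--         ('missing_receipt', 'missing_receipt',
--          ' successful transactions are missing receipt numbers.',
--          'Review transaction data and update if possible'),
--         ('callback_processing_failed', 'failed_callbacks',
--          ' callbacks failed to process.',
--          'Review callback logs and reprocess if necessary'),
--     ]
--     return [{'type': out_type,
--              'message': f'{counts[key]}{suffix}',
--              'action': action}
--             for key, out_type, suffix, action in spec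
--             if counts.get(key, 0) > 0]
-- ===== Notes on version B (the rewrite author's own statement) =====
-- stated objective: alternative
-- what changed: Replaces A's three separate filtering scans and three inlined recommendation blocks with one counting pass building a dict of issue-type counts plus one pass over an externalized spec table (key, type, message suffix, action).
import Mathlib
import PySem

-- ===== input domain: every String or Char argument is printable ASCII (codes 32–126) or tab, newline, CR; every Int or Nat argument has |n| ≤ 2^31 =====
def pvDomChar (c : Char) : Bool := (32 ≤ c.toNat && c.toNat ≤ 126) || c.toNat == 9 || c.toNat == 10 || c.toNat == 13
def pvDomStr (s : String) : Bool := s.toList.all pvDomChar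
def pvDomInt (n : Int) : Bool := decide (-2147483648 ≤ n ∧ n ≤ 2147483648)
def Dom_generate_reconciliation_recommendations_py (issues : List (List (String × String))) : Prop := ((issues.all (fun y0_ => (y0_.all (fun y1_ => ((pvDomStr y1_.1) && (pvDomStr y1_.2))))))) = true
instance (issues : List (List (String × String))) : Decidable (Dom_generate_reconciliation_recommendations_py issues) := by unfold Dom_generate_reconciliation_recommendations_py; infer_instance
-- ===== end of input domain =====

-- B replaces A's three repeated scans and three inlined blocks with one counting
-- pass plus one pass over an external spec table (objective: alternative).

-- ===== PORT A =====
def generate_reconciliation_recommendations_py (issues : List (List (String × String))) : List (List (String × String)) :=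
  let recommendations : List (List (String × String)) := []
  let callback_timeout_count : Nat := (issues.filter (fun i => PySem.Dict.getD (PySem.Dict.mk i) "issue_type" "" == "callback_timeout")).length
  let recommendations := if callback_timeout_count > 0 then
    recommendations ++ [[("type", "callback_timeout"),
      ("message", PySem.Int.toStr (callback_timeout_count : Int) ++ " transactions are pending without callbacks. Consider querying their status."),
      ("action", "Query STK status for pending transactions")]] else recommendations
  let missing_receipt_count : Nat := (issues.filter (fun i => PySem.Dict.getD (PySem.Dict.mk i) "issue_type" "" == "missing_receipt")).length
  let recommendations := if missing_receipt_count > 0 then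
    recommendations ++ [[("type", "missing_receipt"),
      ("message", PySem.Int.toStr (missing_receipt_count : Int) ++ " successful transactions are missing receipt numbers."),
      ("action", "Review transaction data and update if possible")]] else recommendations
  let failed_callback_count : Nat := (issues.filter (fun i => PySem.Dict.getD (PySem.Dict.mk i) "issue_type" "" == "callback_processing_failed")).length
  let recommendations := if failed_callback_count > 0 then
    recommendations ++ [[("type", "failed_callbacks"),
      ("message", PySem.Int.toStr (failed_callback_count : Int) ++ " callbacks failed to process."),
      ("action", "Review callback logs and reprocess if necessary")]] else recommendations
  recommendations

-- ===== PORT B =====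
-- the spec table: (issue_type key, output type, message suffix, action)
def pvSpecTable : List (String × String × String × String) :=
  [("callback_timeout", "callback_timeout",
    " transactions are pending without callbacks. Consider querying their status.",
    "Query STK status for pending transactions"),
   ("missing_receipt", "missing_receipt",
    " successful transactions are missing receipt numbers.",
    "Review transaction data and update if possible"),
   ("callback_processing_failed", "failed_callbacks",
    " callbacks failed to process.",
    "Review callback logs and reprocess if necessary")]

def generate_reconciliation_recommendations_py_alt (issues : List (List (String × String))) : List (List (String × String)) :=
  let counts : PySem.Dict String Int := issues.foldl (fun d i =>
    let t := PySem.Dict.getD (PySem.Dict.mk i) "issue_type" ""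
    PySem.Dict.insert d t (PySem.Dict.getD d t 0 + 1)) PySem.Dict.empty
  pvSpecTable.filterMap (fun s =>
    if PySem.Dict.getD counts s.1 0 > 0 then
      some [("type", s.2.1),
            ("message", PySem.Int.toStr (PySem.Dict.getD counts s.1 0) ++ s.2.2.1),
            ("action", s.2.2.2)]
    else none)

-- ===== PRECONDITION & SPEC =====
-- Pre_ excludes issue dicts lacking the key 'issue_type', on which the Python A raises KeyError.
def Pre_generate_reconciliation_recommendations_py (issues : List (List (String × String))) : Prop :=
  (issues.all (fun i => PySem.Dict.contains (PySem.Dict.mk i) "issue_type")) = true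
instance (issues : List (List (String × String))) : Decidable (Pre_generate_reconciliation_recommendations_py issues) := by unfold Pre_generate_reconciliation_recommendations_py; infer_instance

def pvWitness_generate_reconciliation_recommendations_py : (List (List (String × String))) :=
  [[("issue_type", "callback_timeout")], [("issue_type", "missing_receipt")]]

def Spec_generate_reconciliation_recommendations_py (issues : List (List (String × String))) (out : List (List (String × String))) : Prop := out = generate_reconciliation_recommendations_py_alt issues
instance (issues : List (List (String × String))) (out : List (List (String × String))) : Decidable (Spec_generate_reconciliation_recommendations_py issues out) := by unfold Spec_generate_reconciliation_recommendations_py; infer_instance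

-- ===== CLAIM (what is proved, stated in full; the proofs are below) =====
def Claim_equal_generate_reconciliation_recommendations_py : Prop := ∀ (issues : List (List (String × String))), Dom_generate_reconciliation_recommendations_py issues → Pre_generate_reconciliation_recommendations_py issues → Spec_generate_reconciliation_recommendations_py issues (generate_reconciliation_recommendations_py issues)

-- ===== LEMMAS AND PROOFS =====

-- B's counter, read at key t, equals A's filter-count for t.
theorem pv_counts_eq (issues : List (List (String × String))) (t : String) :
    PySem.Dict.getD (issues.foldl (fun d i =>
      let u := PySem.Dict.getD (PySem.Dict.mk i) "issue_type" ""
      PySem.Dict.insert d u (PySem.Dict.getD d u 0 + 1)) PySem.Dict.empty) t 0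
    = ((issues.filter (fun i => PySem.Dict.getD (PySem.Dict.mk i) "issue_type" "" == t)).length : Int) := by
  have h := PySem.Dict.getD_foldl_insert_add_one
    (l := issues.map (fun i => PySem.Dict.getD (PySem.Dict.mk i) "issue_type" ""))
    (d := (PySem.Dict.empty : PySem.Dict String Int)) (v := t)
  rw [List.foldl_map] at h
  simp only [h, PySem.Dict.getD_empty, zero_add]
  rw [List.count_eq_countP, List.countP_map, List.countP_eq_length_filter]
  rfl

-- ===== VERDICT (by name: the statement is the Claim_ definition above) =====
theorem generate_reconciliation_recommendations_py_spec : Claim_equal_generate_reconciliation_recommendations_py := by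
  intro issues _ _
  unfold Spec_generate_reconciliation_recommendations_py
  unfold generate_reconciliation_recommendations_py generate_reconciliation_recommendations_py_alt pvSpecTable
  simp only [List.filterMap_cons, List.filterMap_nil, pv_counts_eq, Int.natCast_pos]
  split_ifs <;> rfl
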